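-- pv_equiv track=rewrite | github.com/TheBetterDark/Man-Group-Coding-Task | colours.py | find_alphabetical_order
-- ===== SOURCE A (Python) =====
-- def find_alphabetical_order(list):
--     count = 0
--
--     for colour in list:
--         new_list = []
--
--         for colour in colour.split(","):
--             new_list.append(colour)
--
--         new_list1 = new_list[:]
--         new_list1.sort()
--
--         if (new_list1 == new_list):
--             count += 1
--
--     return count
-- ===== SOURCE B (Python) =====
-- def find_alphabetical_order(list):
--     count = 0
--     for colour in list:
--         parts = colour.split(",")
--         ok = True
--         prev = parts[0]
--         for p in parts[1:]:
--             if p < prev: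
--                 ok = False
--                 break
--             prev = p
--         if ok:
--             count += 1
--     return count
-- ===== Notes on version B (the rewrite author's own statement) =====
-- stated objective: alternative
-- what changed: Replaces A's per-item append-loop, copy and sort+list-compare with a single early-exit adjacent-pair scan for sortedness.
import Mathlib
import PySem

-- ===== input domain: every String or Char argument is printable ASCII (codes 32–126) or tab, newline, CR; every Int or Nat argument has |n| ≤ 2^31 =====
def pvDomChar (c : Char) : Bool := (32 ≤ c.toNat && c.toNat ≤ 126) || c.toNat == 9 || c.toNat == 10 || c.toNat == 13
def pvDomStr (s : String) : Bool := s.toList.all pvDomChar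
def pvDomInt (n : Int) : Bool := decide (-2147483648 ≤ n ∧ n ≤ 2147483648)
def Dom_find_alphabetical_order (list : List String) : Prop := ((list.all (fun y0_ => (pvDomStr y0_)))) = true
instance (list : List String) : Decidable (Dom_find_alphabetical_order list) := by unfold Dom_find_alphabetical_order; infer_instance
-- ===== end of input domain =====

-- B decides each item by one early-exit adjacent-pair scan instead of A's append-loop + copy + sort + list-compare.

-- ===== PORT A =====
def find_alphabetical_order (list : List String) : Int :=
  list.foldl (fun count colour =>
    -- new_list = []; for colour in colour.split(","): new_list.append(colour)
    let new_list := (((PySem.Str.split? colour ",").getD []).foldl (fun acc c => acc ++ [c]) [])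
    -- new_list1 = new_list[:]; new_list1.sort()
    let new_list1 := PySem.List.sorted new_list (fun x => x) false
    if new_list1 == new_list then count + 1 else count) 0

-- ===== PORT B =====
-- loop body 'if p < prev: ok = False; break' / 'prev = p': the state freezes once ok is False
def pvStep : Bool × String → String → Bool × String
  | (true, prev), p => if p < prev then (false, prev) else (true, p)
  | st, _ => st

def find_alphabetical_order_alt (list : List String) : Int :=
  list.foldl (fun count colour =>
    let parts := (PySem.Str.split? colour ",").getD []
    match parts with
    | [] => count  -- unreachable: split with a non-empty separator never returns an empty list
    | p0 :: rest =>
      -- ok = True; prev = parts[0]; for p in parts[1:]: …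
      let st := rest.foldl pvStep (true, p0)
      if st.1 then count + 1 else count) 0

-- ===== PRECONDITION & SPEC =====
def Spec_find_alphabetical_order (list : List String) (out : Int) : Prop := out = find_alphabetical_order_alt list
instance (list : List String) (out : Int) : Decidable (Spec_find_alphabetical_order list out) := by unfold Spec_find_alphabetical_order; infer_instance

-- ===== CLAIM (what is proved, stated in full; the proofs are below) =====
def Claim_equal_find_alphabetical_order : Prop := ∀ (list : List String), Dom_find_alphabetical_order list → Spec_find_alphabetical_order list (find_alphabetical_order list)

-- ===== LEMMAS AND PROOFS =====

theorem pv_foldl_append (l acc : List String) : l.foldl (fun a c => a ++ [c]) acc = acc ++ l := by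
  induction l generalizing acc with
  | nil => simp
  | cons x t ih => simp [List.foldl, ih]

theorem pv_splitOn_go_ne_nil (sep : List Char) (fuel : Nat) (cs cur : List Char)
    (l : List (List Char)) : PySem.Chars.splitOn.go sep fuel cs cur l ≠ [] := by
  induction fuel generalizing cs cur l with
  | zero => simp [PySem.Chars.splitOn.go]
  | succ n ih =>
    cases cs with
    | nil => simp [PySem.Chars.splitOn.go]
    | cons c t =>
      simp only [PySem.Chars.splitOn.go]
      split
      · exact ih _ _ _
      · exact ih _ _ _

theorem pv_split_ne_nil (s : String) : (PySem.Str.split? s ",").getD [] ≠ [] := by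
  simp [PySem.Str.split?, PySem.Chars.split?, PySem.Chars.splitOn, pv_splitOn_go_ne_nil]

theorem pv_fold_false (rest : List String) (x : String) :
    rest.foldl pvStep (false, x) = (false, x) := by
  induction rest with
  | nil => rfl
  | cons p t ih => simpa [pvStep] using ih

theorem pv_fold_chain (rest : List String) (prev : String) :
    ((rest.foldl pvStep (true, prev)).1 = true) ↔ List.Pairwise (· ≤ ·) (prev :: rest) := by
  induction rest generalizing prev with
  | nil => simp
  | cons p t ih =>
    by_cases h : p < prev
    · rw [List.foldl_cons, show pvStep (true, prev) p = (false, prev) from by simp [pvStep, h],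
        pv_fold_false]
      constructor
      · intro hf; exact absurd hf (by simp)
      · intro hp
        exact absurd ((List.pairwise_cons.mp hp).1 p List.mem_cons_self) (not_le.mpr h)
    · rw [List.foldl_cons, show pvStep (true, prev) p = (true, p) from by simp [pvStep, h], ih p]
      constructor
      · intro hp
        refine List.pairwise_cons.mpr ⟨?_, hp⟩
        intro z hz
        rcases List.mem_cons.mp hz with rfl | hz'
        · exact not_lt.mp h
        · exact le_trans (not_lt.mp h) ((List.pairwise_cons.mp hp).1 z hz')
      · intro hp; exact (List.pairwise_cons.mp hp).2

theorem pv_sorted_eq_flag (p0 : String) (rest : List String) :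
    (PySem.List.sorted (p0 :: rest) (fun x => x) false == p0 :: rest) =
      (rest.foldl pvStep (true, p0)).1 := by
  rcases h : (rest.foldl pvStep (true, p0)).1 with _ | _
  · apply beq_eq_false_iff_ne.mpr
    intro heq
    have hp : (p0 :: rest).Pairwise (fun a b => (fun x : String => x) a ≤ (fun x => x) b) := by
      have := PySem.List.sorted_pairwise (p0 :: rest) (fun x : String => x)
      rwa [heq] at this
    have := (pv_fold_chain rest p0).mpr hp
    rw [h] at this; exact Bool.false_ne_true this
  · exact beq_iff_eq.mpr
      (PySem.List.sorted_eq_self_of_pairwise (p0 :: rest) (fun x => x)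
        ((pv_fold_chain rest p0).mp h))

theorem pv_step_eq (colour : String) (count : Int) :
    (let new_list := (((PySem.Str.split? colour ",").getD []).foldl (fun acc c => acc ++ [c]) [])
     let new_list1 := PySem.List.sorted new_list (fun x => x) false
     if new_list1 == new_list then count + 1 else count) =
    (let parts := (PySem.Str.split? colour ",").getD []
     match parts with
     | [] => count
     | p0 :: rest =>
       let st := rest.foldl pvStep (true, p0)
       if st.1 then count + 1 else count) := by
  simp only [pv_foldl_append, List.nil_append]
  rcases hp : (PySem.Str.split? colour ",").getD [] with _ | ⟨p0, rest⟩
  · exact absurd hp (pv_split_ne_nil colour)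
  · simp only [pv_sorted_eq_flag]

-- ===== VERDICT (by name: the statement is the Claim_ definition above) =====
theorem find_alphabetical_order_spec : Claim_equal_find_alphabetical_order := by
  intro list _
  unfold Spec_find_alphabetical_order find_alphabetical_order find_alphabetical_order_alt
  simp only [pv_step_eq]
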